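-- pv_equiv track=rewrite | github.com/jahirulislammolla/CodeFights | Fights/pairOfShoes.py | pairOfShoes
-- ===== SOURCE A (Python) =====
-- def pairOfShoes(shoes):
--     leftShoes = []
--     rightShoes = []
--     for i in range(len(shoes)):
--         if shoes[i][0] == 0:
--             leftShoes.append(shoes[i][1])
--         else:
--             rightShoes.append(shoes[i][1])
--     leftShoes.sort()
--     rightShoes.sort()
--     if len(leftShoes) != len(rightShoes):
--         return False
--     for i in range(len(leftShoes)):
--         if leftShoes[i] != rightShoes[i]:
--             return False
--     return True
-- ===== SOURCE B (Python) =====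
-- def pairOfShoes(shoes):
--     bal = {}
--     for pair in shoes:
--         bal[pair[1]] = bal.get(pair[1], 0) + (1 if pair[0] == 0 else -1)
--     return all(v == 0 for v in bal.values())
-- ===== Notes on version B (the rewrite author's own statement) =====
-- stated objective: simpler
-- what changed: Replaces partitioning into two lists, sorting both and comparing element-wise by a single pass maintaining a dict of signed size counts (+1 left, -1 right) that must all end at zero; no sort, no length check, no comparison loop.
import Mathlib
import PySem

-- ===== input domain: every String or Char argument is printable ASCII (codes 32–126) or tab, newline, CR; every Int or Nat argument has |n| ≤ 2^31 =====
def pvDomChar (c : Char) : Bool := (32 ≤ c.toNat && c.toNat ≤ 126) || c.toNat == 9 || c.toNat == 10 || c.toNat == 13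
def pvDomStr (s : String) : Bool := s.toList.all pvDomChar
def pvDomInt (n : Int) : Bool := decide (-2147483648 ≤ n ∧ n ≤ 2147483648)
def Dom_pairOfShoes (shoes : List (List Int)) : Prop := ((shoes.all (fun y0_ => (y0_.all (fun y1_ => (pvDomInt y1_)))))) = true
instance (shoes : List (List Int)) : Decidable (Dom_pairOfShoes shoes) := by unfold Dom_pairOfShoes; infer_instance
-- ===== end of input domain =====

-- B replaces A's partition-into-two-lists + sort both + element-wise compare by one pass
-- keeping a dict of signed per-size counts that must all end at zero; objective: simpler.

-- ===== PORT A =====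
-- indexing via pyGetD: exact under Pre_ (outer index i ∈ range(len(shoes)) is always in range,
-- inner indices 0 and 1 are in range since 2 ≤ p.length)
def pairOfShoes (shoes : List (List Int)) : Bool :=
  let lr := (PySem.List.pyRange 0 (PySem.List.len shoes)).foldl
    (fun (acc : List Int × List Int) i =>
      if PySem.List.pyGetD (PySem.List.pyGetD shoes i []) 0 0 == 0 then
        (acc.1 ++ [PySem.List.pyGetD (PySem.List.pyGetD shoes i []) 1 0], acc.2)
      else
        (acc.1, acc.2 ++ [PySem.List.pyGetD (PySem.List.pyGetD shoes i []) 1 0]))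
    ([], [])
  let ls := PySem.List.sorted lr.1 id
  let rs := PySem.List.sorted lr.2 id
  if PySem.List.len ls ≠ PySem.List.len rs then false
  else
    -- Python's early `return False` on a mismatch: the && fold stays false afterwards, same result
    (PySem.List.pyRange 0 (PySem.List.len ls)).foldl
      (fun ok i => ok && (PySem.List.pyGetD ls i 0 == PySem.List.pyGetD rs i 0)) true

-- ===== PORT B =====
def pairOfShoes_alt (shoes : List (List Int)) : Bool :=
  let bal := shoes.foldl
    (fun (d : PySem.Dict Int Int) p =>
      d.insert (PySem.List.pyGetD p 1 0)
        (d.getD (PySem.List.pyGetD p 1 0) 0 +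
          (if PySem.List.pyGetD p 0 0 == 0 then 1 else -1)))
    PySem.Dict.empty
  bal.values.all (fun v => v == 0)

-- ===== PRECONDITION & SPEC =====
-- A (and B) raise IndexError on any inner list of length < 2 (shoes[i][1]); exactly those inputs are excluded.
def Pre_pairOfShoes (shoes : List (List Int)) : Prop := ∀ p ∈ shoes, 2 ≤ p.length
instance (shoes : List (List Int)) : Decidable (Pre_pairOfShoes shoes) := by unfold Pre_pairOfShoes; infer_instance
def pvWitness_pairOfShoes : List (List Int) := [[0, 3], [1, 3]]

def Spec_pairOfShoes (shoes : List (List Int)) (out : Bool) : Prop := out = pairOfShoes_alt shoes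
instance (shoes : List (List Int)) (out : Bool) : Decidable (Spec_pairOfShoes shoes out) := by unfold Spec_pairOfShoes; infer_instance

-- ===== CLAIM (what is proved, stated in full; the proofs are below) =====
def Claim_equal_pairOfShoes : Prop := ∀ (shoes : List (List Int)), Dom_pairOfShoes shoes → Pre_pairOfShoes shoes → Spec_pairOfShoes shoes (pairOfShoes shoes)

-- ===== LEMMAS AND PROOFS =====

-- the "is left shoe" test and the size of a shoe, as A and B both read them
def pvIsL (p : List Int) : Bool := PySem.List.pyGetD p 0 0 == 0
def pvKey (p : List Int) : Int := PySem.List.pyGetD p 1 0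
-- the left / right size lists A builds
def pvL (l : List (List Int)) : List Int := (l.filter pvIsL).map pvKey
def pvR (l : List (List Int)) : List Int := (l.filter (fun p => !pvIsL p)).map pvKey

theorem pv_part_fold (l : List (List Int)) (a b : List Int) :
    l.foldl (fun (acc : List Int × List Int) p =>
      if pvIsL p then (acc.1 ++ [pvKey p], acc.2) else (acc.1, acc.2 ++ [pvKey p])) (a, b)
    = (a ++ pvL l, b ++ pvR l) := by
  induction l generalizing a b with
  | nil => simp [pvL, pvR]
  | cons p t ih => by_cases h : pvIsL p = true <;> simp [pvL, pvR, h, ih]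

theorem pv_cmp_fold (ls rs : List Int) (n : Nat) (b : Bool) :
    (PySem.List.pyRange 0 (n : Int)).foldl
      (fun ok i => ok && (PySem.List.pyGetD ls i 0 == PySem.List.pyGetD rs i 0)) b
    = (b && decide (∀ i : Nat, i < n → PySem.List.pyGetD ls (i : Int) 0 = PySem.List.pyGetD rs (i : Int) 0)) := by
  induction n generalizing b with
  | zero => simp [PySem.List.pyRange]
  | succ m ih =>
    have hsplit : PySem.List.pyRange 0 ((m + 1 : Nat) : Int)
        = PySem.List.pyRange 0 (m : Int) ++ [(m : Int)] := by
      rw [show ((m + 1 : Nat) : Int) = (m : Int) + 1 by push_cast; ring,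
          PySem.List.pyRange_one_append 0 (m : Int) ((m : Int) + 1) (by exact_mod_cast Nat.zero_le m) (by linarith),
          PySem.List.pyRange_one_cons (show (m : Int) < (m : Int) + 1 by linarith)]
      congr 1
      simp [PySem.List.pyRange]
    rw [hsplit, List.foldl_append, ih]
    simp only [List.foldl_cons, List.foldl_nil]
    have h2 : (∀ i : Nat, i < m + 1 → PySem.List.pyGetD ls (i : Int) 0 = PySem.List.pyGetD rs (i : Int) 0)
        ↔ ((∀ i : Nat, i < m → PySem.List.pyGetD ls (i : Int) 0 = PySem.List.pyGetD rs (i : Int) 0)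
           ∧ PySem.List.pyGetD ls (m : Int) 0 = PySem.List.pyGetD rs (m : Int) 0) := by
      constructor
      · exact fun h => ⟨fun i hi => h i (by omega), h m (by omega)⟩
      · rintro ⟨h, hm⟩ i hi
        rcases Nat.lt_succ_iff_lt_or_eq.mp hi with h' | rfl
        · exact h i h'
        · exact hm
    cases b
    · simp
    · simp only [Bool.true_and]
      rw [Bool.eq_iff_iff]
      simp only [Bool.and_eq_true, decide_eq_true_eq, beq_iff_eq]
      exact h2.symm

theorem pv_ptwise (ls rs : List Int) (hlen : ls.length = rs.length) :
    (∀ i : Nat, i < ls.length → PySem.List.pyGetD ls (i : Int) 0 = PySem.List.pyGetD rs (i : Int) 0) ↔ ls = rs := by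
  constructor
  · intro h
    apply List.ext_getElem hlen
    intro i h1 h2
    have := h i h1
    rw [PySem.List.pyGetD_eq_getElem ls 0 (by positivity) (by exact_mod_cast h1),
        PySem.List.pyGetD_eq_getElem rs 0 (by positivity) (by exact_mod_cast h2)] at this
    simpa using this
  · rintro rfl i _; rfl

theorem pv_sorted_eq_iff (xs ys : List Int) :
    PySem.List.sorted xs id = PySem.List.sorted ys id ↔ xs.Perm ys := by
  constructor
  · intro h
    exact ((PySem.List.sorted_perm xs id false).symm.trans (h ▸ PySem.List.sorted_perm ys id false))
  · intro h
    apply List.eq_of_perm_of_sorted (le := fun a b : Int => a ≤ b)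
    · intro a b _ _ hab hba; omega
    · simpa using PySem.List.sorted_pairwise xs id
    · simpa using PySem.List.sorted_pairwise ys id
    · exact ((PySem.List.sorted_perm xs id false).trans h).trans (PySem.List.sorted_perm ys id false).symm

theorem pv_A_eq (shoes : List (List Int)) :
    pairOfShoes shoes = decide (PySem.List.sorted (pvL shoes) id = PySem.List.sorted (pvR shoes) id) := by
  unfold pairOfShoes
  have hfold := PySem.List.foldl_pyRange_pyGetD (xs := shoes) (d := ([] : List Int))
    (f := fun (acc : List Int × List Int) p =>
      if PySem.List.pyGetD p 0 0 == 0 then (acc.1 ++ [PySem.List.pyGetD p 1 0], acc.2)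
      else (acc.1, acc.2 ++ [PySem.List.pyGetD p 1 0]))
    (init := (([] : List Int), ([] : List Int))) (a := 0) le_rfl
  simp only [Int.toNat_zero, List.drop_zero] at hfold
  rw [hfold]
  have hpart := pv_part_fold shoes [] []
  simp only [pvIsL, pvKey] at hpart
  rw [hpart]
  simp only [List.nil_append]
  by_cases hlen : PySem.List.len (PySem.List.sorted (pvL shoes) id) = PySem.List.len (PySem.List.sorted (pvR shoes) id)
  · rw [if_neg (by simpa using hlen)]
    have hlen' : (PySem.List.sorted (pvL shoes) id).length = (PySem.List.sorted (pvR shoes) id).length := by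
      simpa [PySem.List.len_eq] using hlen
    rw [PySem.List.len_eq, pv_cmp_fold, Bool.true_and]
    rw [Bool.eq_iff_iff]
    simp only [decide_eq_true_eq]
    exact pv_ptwise _ _ hlen'
  · rw [if_pos (by simpa using hlen)]
    symm
    rw [decide_eq_false_iff_not]
    intro h
    exact hlen (by rw [h])

theorem pv_bal_getD (l : List (List Int)) (d : PySem.Dict Int Int) (v : Int) :
    (l.foldl (fun (d : PySem.Dict Int Int) p =>
        d.insert (PySem.List.pyGetD p 1 0)
          (d.getD (PySem.List.pyGetD p 1 0) 0 +
            (if PySem.List.pyGetD p 0 0 == 0 then 1 else -1))) d).getD v 0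
    = d.getD v 0 + ((pvL l).count v : Int) - ((pvR l).count v : Int) := by
  induction l generalizing d with
  | nil => simp [pvL, pvR]
  | cons p t ih =>
    rw [List.foldl_cons, ih]
    rw [PySem.Dict.getD_insert]
    by_cases hk : v = PySem.List.pyGetD p 1 0
    · by_cases hl : (PySem.List.pyGetD p 0 0 == 0) = true <;>
        simp [pvL, pvR, pvIsL, pvKey, hk, hl] <;> ring
    · have hk2 : ¬ PySem.List.pyGetD p 1 0 = v := fun hh => hk hh.symm
      by_cases hl : (PySem.List.pyGetD p 0 0 == 0) = true <;>
        simp [pvL, pvR, pvIsL, pvKey, hk, hk2, hl]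

theorem pv_B_iff (shoes : List (List Int)) :
    pairOfShoes_alt shoes = true ↔ ∀ v : Int, (pvL shoes).count v = (pvR shoes).count v := by
  unfold pairOfShoes_alt
  simp only []
  have hnd : ((shoes.foldl (fun (d : PySem.Dict Int Int) p =>
      d.insert (PySem.List.pyGetD p 1 0)
        (d.getD (PySem.List.pyGetD p 1 0) 0 +
          (if PySem.List.pyGetD p 0 0 == 0 then 1 else -1))) PySem.Dict.empty)).keys.Nodup := by
    exact PySem.Dict.nodup_keys_foldl_insert_key shoes (fun p => PySem.List.pyGetD p 1 0) _ _ (by simp [PySem.Dict.empty])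
  rw [PySem.Dict.values_eq_map_keys _ hnd 0]
  have hkeys := PySem.Dict.keys_foldl_insert_key (κ := Int) (ν := Int) shoes
      (fun p => PySem.List.pyGetD p 1 0)
      (fun d p => d.getD (PySem.List.pyGetD p 1 0) 0 + (if PySem.List.pyGetD p 0 0 == 0 then 1 else -1))
      PySem.Dict.empty
  constructor
  · intro h v
    have hmem : ∀ k ∈ (shoes.map pvKey), ((pvL shoes).count k : Int) - ((pvR shoes).count k : Int) = 0 := by
      intro k hkmem
      have hk' : k ∈ (shoes.foldl (fun (d : PySem.Dict Int Int) p =>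
          d.insert (PySem.List.pyGetD p 1 0)
            (d.getD (PySem.List.pyGetD p 1 0) 0 +
              (if PySem.List.pyGetD p 0 0 == 0 then 1 else -1))) PySem.Dict.empty).keys := by
        rw [hkeys]
        refine (PySem.Set.mem_update _ _ _).2 (Or.inr ?_)
        simpa [pvKey] using hkmem
      have := (List.all_eq_true.mp h) _ (List.mem_map_of_mem hk')
      rw [pv_bal_getD, beq_iff_eq] at this
      simpa [PySem.Dict.getD_empty] using this
    by_cases hv : v ∈ shoes.map pvKey
    · have := hmem v hv; omega
    · have h1 : (pvL shoes).count v = 0 := by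
        rw [List.count_eq_zero]
        intro hc
        apply hv
        rcases List.mem_map.mp hc with ⟨p, hp, rfl⟩
        exact List.mem_map_of_mem (List.mem_of_mem_filter hp)
      have h2 : (pvR shoes).count v = 0 := by
        rw [List.count_eq_zero]
        intro hc
        apply hv
        rcases List.mem_map.mp hc with ⟨p, hp, rfl⟩
        exact List.mem_map_of_mem (List.mem_of_mem_filter hp)
      rw [h1, h2]
  · intro h
    rw [List.all_eq_true]
    rintro x hx
    rcases List.mem_map.mp hx with ⟨k, _, rfl⟩
    rw [beq_iff_eq, pv_bal_getD, PySem.Dict.getD_empty]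
    have := h k
    omega

-- ===== VERDICT (by name: the statement is the Claim_ definition above) =====
theorem pairOfShoes_spec : Claim_equal_pairOfShoes := by
  intro shoes _ _
  unfold Spec_pairOfShoes
  rw [pv_A_eq, Bool.eq_iff_iff]
  simp only [decide_eq_true_eq]
  rw [pv_sorted_eq_iff, List.perm_iff_count]
  exact (pv_B_iff shoes).symm
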